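-- pv_equiv track=rewrite | github.com/parkjunga/algorithm | 프로그래머스_lev00/개미군단.py | solution
-- ===== SOURCE A (Python) =====
-- def solution(hp):
--     answer = 0
--     top = 5
--     middle = 3
--     row = 1
--     answer = hp // top
--     hp = hp % top
--     while hp > 0:
--         if hp % middle == 0 and hp >= middle:
--             answer += hp // middle
--             hp = hp % middle
--         elif hp >= row:
--             answer += row
--             hp = hp - row
--         else:
--             answer += hp // row
--
--
--     return answer
-- ===== SOURCE B (Python) =====
-- def solution(hp):
--     r = hp % 5
--     return hp // 5 + r // 3 + r % 3
-- ===== Notes on version B (the rewrite author's own statement) =====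
-- stated objective: simpler
-- what changed: Replaces the while-loop with mutable answer/hp state by a single closed-form arithmetic expression hp//5 + (hp%5)//3 + (hp%5)%3, valid because the remainder after //5 is in 0..4.
import Mathlib
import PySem

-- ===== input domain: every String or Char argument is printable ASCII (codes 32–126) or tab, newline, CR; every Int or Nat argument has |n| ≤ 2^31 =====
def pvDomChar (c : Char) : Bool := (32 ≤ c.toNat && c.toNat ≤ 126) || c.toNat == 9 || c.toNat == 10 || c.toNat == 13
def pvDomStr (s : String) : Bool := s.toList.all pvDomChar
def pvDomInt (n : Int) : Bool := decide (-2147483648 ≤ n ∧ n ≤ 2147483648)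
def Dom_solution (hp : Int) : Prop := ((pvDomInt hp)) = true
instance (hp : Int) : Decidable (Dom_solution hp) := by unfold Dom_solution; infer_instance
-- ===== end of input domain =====

-- B replaces A's while-loop over mutable answer/hp by one closed-form expression (objective: simpler).

-- ===== PORT A =====
-- Literal port of A's while loop: state (hp, answer); the Python 'else' branch
-- (0 < hp < 1) is unreachable on Int, ported as an eliminated-impossible case.
def solutionLoop (hp answer : Int) : Int :=
  if h : hp > 0 then
    if PySem.Int.mod hp 3 = 0 ∧ hp ≥ 3 then
      solutionLoop (PySem.Int.mod hp 3) (answer + PySem.Int.floordiv hp 3)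
    else if h1 : hp ≥ 1 then
      solutionLoop (hp - 1) (answer + 1)
    else
      (by omega : False).elim   -- on Int, hp > 0 contradicts ¬(hp ≥ 1); Python never reaches this branch
  else
    answer
termination_by hp.toNat
decreasing_by
  · have h0 : 0 ≤ PySem.Int.mod hp 3 := PySem.Int.mod_nonneg _ (by norm_num)
    have h3 : PySem.Int.mod hp 3 < 3 := PySem.Int.mod_lt _ (by norm_num)
    omega
  · omega

def solution (hp : Int) : Int :=
  solutionLoop (PySem.Int.mod hp 5) (PySem.Int.floordiv hp 5)

-- ===== PORT B =====
def solution_alt (hp : Int) : Int :=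
  let r := PySem.Int.mod hp 5
  PySem.Int.floordiv hp 5 + PySem.Int.floordiv r 3 + PySem.Int.mod r 3

-- ===== PRECONDITION & SPEC =====
def Spec_solution (hp : Int) (out : Int) : Prop := out = solution_alt hp
instance (hp : Int) (out : Int) : Decidable (Spec_solution hp out) := by unfold Spec_solution; infer_instance

-- ===== CLAIM (what is proved, stated in full; the proofs are below) =====
def Claim_equal_solution : Prop := ∀ (hp : Int), Dom_solution hp → Spec_solution hp (solution hp)

-- ===== LEMMAS AND PROOFS =====

-- The loop, started at any r with 0 ≤ r < 5, adds exactly r//3 + r%3 to the accumulator.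
theorem loop0 (a : Int) : solutionLoop 0 a = a := by
  rw [solutionLoop]; norm_num

theorem loop1 (a : Int) : solutionLoop 1 a = a + 1 := by
  rw [solutionLoop]
  norm_num [loop0, (by decide : PySem.Int.mod (1:Int) 3 = 1)]

theorem loop2 (a : Int) : solutionLoop 2 a = a + 2 := by
  rw [solutionLoop]
  norm_num [loop1, (by decide : PySem.Int.mod (2:Int) 3 = 2)]
  ring

theorem loop3 (a : Int) : solutionLoop 3 a = a + 1 := by
  rw [solutionLoop]
  norm_num [loop0, (by decide : PySem.Int.mod (3:Int) 3 = 0),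
    (by decide : PySem.Int.floordiv (3:Int) 3 = 1)]

theorem loop4 (a : Int) : solutionLoop 4 a = a + 2 := by
  rw [solutionLoop]
  norm_num [loop3, (by decide : PySem.Int.mod (4:Int) 3 = 1)]
  ring

theorem solutionLoop_closed (r a : Int) (h0 : 0 ≤ r) (h5 : r < 5) :
    solutionLoop r a = a + PySem.Int.floordiv r 3 + PySem.Int.mod r 3 := by
  interval_cases r
  · rw [loop0]; norm_num [(by decide : PySem.Int.mod (0:Int) 3 = 0),
      (by decide : PySem.Int.floordiv (0:Int) 3 = 0)]
  · rw [loop1]; norm_num [(by decide : PySem.Int.mod (1:Int) 3 = 1),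
      (by decide : PySem.Int.floordiv (1:Int) 3 = 0)]
  · rw [loop2]; norm_num [(by decide : PySem.Int.mod (2:Int) 3 = 2),
      (by decide : PySem.Int.floordiv (2:Int) 3 = 0)]
  · rw [loop3]; norm_num [(by decide : PySem.Int.mod (3:Int) 3 = 0),
      (by decide : PySem.Int.floordiv (3:Int) 3 = 1)]
  · rw [loop4]; rw [(by decide : PySem.Int.mod (4:Int) 3 = 1),
      (by decide : PySem.Int.floordiv (4:Int) 3 = 1)]; ring

-- ===== VERDICT (by name: the statement is the Claim_ definition above) =====
theorem solution_spec : Claim_equal_solution := by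
  intro hp _
  unfold Spec_solution solution solution_alt
  exact solutionLoop_closed _ _ (PySem.Int.mod_nonneg _ (by norm_num)) (PySem.Int.mod_lt _ (by norm_num))
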